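-- pv_equiv track=rewrite | github.com/p-dimi/api-endpoint-for-database-requests | handler/views.py | group_models
-- ===== SOURCE A (Python) =====
-- def group_models(models, grouping_columns):
--     grouped_models_set = []
--
--     groups = {}
--
--     for model_obj in models:
--         # get the grouping attributes
--         attributes = []
--         for col in grouping_columns:
--             attribute = model_obj[col]
--             attributes.append(attribute)
--
--         # add the attribute(s) to the groups dictionary as keys
--         # if that key already exists = instead add the model_obj to the group under that key
--         key = '-'.join(attributes)
--         if key in groups:
--             groups[key].append(model_obj)
--         else:
--             groups[key] = [model_obj]
--
--     # the groups dictionary should now have all the grouped model objects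
--     # the information is not being summed, as this will lead to the loss of information in requested columns that are not in the grouping columns
--
--     # create a new models set based on the groups
--     for key in groups:
--         grouped_models_set.extend(groups[key])
--
--     # return new models set, that is grouped
--     return grouped_models_set
-- ===== SOURCE B (Python) =====
-- def group_models(models, grouping_columns):
--     def key_of(m):
--         return '-'.join(m[c] for c in grouping_columns)
--     keys = []
--     for m in models:
--         k = key_of(m)
--         if k not in keys:
--             keys.append(k)
--     grouped = []
--     for k in keys:
--         grouped.extend(m for m in models if key_of(m) == k)
--     return grouped
-- ===== Notes on version B (the rewrite author's own statement) =====
-- stated objective: alternative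
-- what changed: Replaced A's single-pass dict-of-lists grouping with a two-phase collect-distinct-keys-then-filter-per-key traversal (no dict, no per-key accumulation); output order is identical because groups appear by first key occurrence and filtering is stable.
import Mathlib
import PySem

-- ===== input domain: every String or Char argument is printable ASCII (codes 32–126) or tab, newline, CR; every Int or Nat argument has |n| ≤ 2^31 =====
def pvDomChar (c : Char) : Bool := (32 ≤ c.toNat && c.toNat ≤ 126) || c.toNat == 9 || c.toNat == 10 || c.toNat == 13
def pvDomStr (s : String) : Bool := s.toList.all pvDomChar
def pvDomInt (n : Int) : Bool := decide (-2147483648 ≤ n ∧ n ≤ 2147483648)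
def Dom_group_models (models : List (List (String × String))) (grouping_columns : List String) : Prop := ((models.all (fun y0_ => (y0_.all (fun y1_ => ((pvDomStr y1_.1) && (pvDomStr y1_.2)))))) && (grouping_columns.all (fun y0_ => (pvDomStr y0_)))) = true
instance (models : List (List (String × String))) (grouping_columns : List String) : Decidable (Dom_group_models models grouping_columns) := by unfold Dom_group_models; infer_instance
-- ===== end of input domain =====

-- B replaces A's single-pass dict-of-lists grouping by a two-phase collect-distinct-keys-then-filter-per-key
-- traversal (objective: alternative; same output, group order by first key appearance, stable within group).


-- ===== PORT A =====
-- A's inner loop: attributes = []; for col in grouping_columns: attributes.append(model_obj[col]); key = '-'.join(attributes)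
-- (model_obj[col] is ported as getD with default ""; Pre_ excludes the KeyError inputs where the key is absent)
def pvKeyA (grouping_columns : List String) (m : List (String × String)) : String :=
  PySem.Str.join "-"
    (grouping_columns.foldl (fun attributes col => attributes ++ [(PySem.Dict.mk m).getD col ""]) [])

def group_models (models : List (List (String × String))) (grouping_columns : List String) : List (List (String × String)) :=
  let groups : PySem.Dict String (List (List (String × String))) :=
    models.foldl (fun groups model_obj =>
      let key := pvKeyA grouping_columns model_obj
      if groups.contains key then groups.modify key [] (fun g => g ++ [model_obj])
      else groups.insert key [model_obj]) PySem.Dict.empty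
  groups.keys.foldl (fun out key => out ++ groups.getD key []) []

-- ===== PORT B =====
-- B's helper: key_of(m) = '-'.join(m[c] for c in grouping_columns)
def pvKeyB (grouping_columns : List String) (m : List (String × String)) : String :=
  PySem.Str.join "-" (grouping_columns.map (fun c => (PySem.Dict.mk m).getD c ""))

def group_models_alt (models : List (List (String × String))) (grouping_columns : List String) : List (List (String × String)) :=
  let keys : PySem.Set String :=
    models.foldl (fun ks m => PySem.Set.add ks (pvKeyB grouping_columns m)) []
  keys.foldl (fun grouped k => grouped ++ models.filter (fun m => pvKeyB grouping_columns m == k)) []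

-- ===== PRECONDITION & SPEC =====
-- Pre_ excludes exactly the inputs where Python A raises KeyError: some model lacks one of the grouping columns.
def Pre_group_models (models : List (List (String × String))) (grouping_columns : List String) : Prop :=
  ∀ m ∈ models, ∀ col ∈ grouping_columns, (PySem.Dict.mk m).contains col = true
instance (models : List (List (String × String))) (grouping_columns : List String) : Decidable (Pre_group_models models grouping_columns) := by unfold Pre_group_models; infer_instance

def pvWitness_group_models : (List (List (String × String))) × List String :=
  ([[("a", "x"), ("b", "u")], [("a", "y"), ("b", "v")], [("a", "x"), ("b", "w")]], ["a"])

def Spec_group_models (models : List (List (String × String))) (grouping_columns : List String) (out : List (List (String × String))) : Prop := out = group_models_alt models grouping_columns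
instance (models : List (List (String × String))) (grouping_columns : List String) (out : List (List (String × String))) : Decidable (Spec_group_models models grouping_columns out) := by unfold Spec_group_models; infer_instance

-- ===== CLAIM (what is proved, stated in full; the proofs are below) =====
def Claim_equal_group_models : Prop := ∀ (models : List (List (String × String))) (grouping_columns : List String), Dom_group_models models grouping_columns → Pre_group_models models grouping_columns → Spec_group_models models grouping_columns (group_models models grouping_columns)

-- ===== LEMMAS AND PROOFS =====

-- A's attribute loop computes the same key as B's comprehension
theorem pvKeyA_eq_pvKeyB (cols : List String) (m : List (String × String)) :
    pvKeyA cols m = pvKeyB cols m := by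
  unfold pvKeyA pvKeyB
  rw [PySem.List.foldl_append_singleton_eq_map]
  rfl

-- A's if-guarded dict step is the unconditional modify step
theorem pvStepA_eq_modify (g : PySem.Dict String (List (List (String × String)))) (k : String)
    (m : List (String × String)) :
    (if g.contains k then g.modify k [] (fun l => l ++ [m]) else g.insert k [m])
      = g.modify k [] (fun l => l ++ [m]) := by
  by_cases h : g.contains k = true
  · simp [h]
  · have hD : g.getD k [] = [] := PySem.Dict.getD_of_not_contains g []
      (by simpa using h)
    simp only [h]
    show g.insert k [m] = g.insert k (g.getD k [] ++ [m])
    rw [hD]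
    simp

theorem pvBuild_eq (models : List (List (String × String))) (cols : List String) :
    models.foldl (fun groups model_obj =>
        let key := pvKeyA cols model_obj
        if groups.contains key then groups.modify key [] (fun g => g ++ [model_obj])
        else groups.insert key [model_obj]) PySem.Dict.empty
      = models.foldl (fun g m => g.modify (pvKeyB cols m) [] (fun l => l ++ [m])) PySem.Dict.empty := by
  apply PySem.List.foldl_congr_mem
  intro g m _
  rw [pvKeyA_eq_pvKeyB, pvStepA_eq_modify]

theorem pvBuild_getD (models : List (List (String × String))) (cols : List String) (c : String) :
    (models.foldl (fun g m => g.modify (pvKeyB cols m) [] (fun l => l ++ [m])) PySem.Dict.empty).getD c []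
      = models.filter (fun m => pvKeyB cols m == c) := by
  rw [show (models.foldl (fun g m => g.modify (pvKeyB cols m) [] (fun l => l ++ [m])) PySem.Dict.empty)
        = (models.map (fun m => (pvKeyB cols m, m))).foldl
            (fun g p => g.modify p.1 [] (fun l => l ++ [p.2])) PySem.Dict.empty from
      (@List.foldl_map _ _ _ (fun m => (pvKeyB cols m, m))
        (fun g p => g.modify p.1 [] (fun l => l ++ [p.2])) models PySem.Dict.empty).symm]
  rw [PySem.Dict.getD_foldl_modify_append]
  simp [List.filter_map, Function.comp_def]

theorem pvBuild_keys (models : List (List (String × String))) (cols : List String) :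
    (models.foldl (fun g m => g.modify (pvKeyB cols m) [] (fun l => l ++ [m])) PySem.Dict.empty).keys
      = models.foldl (fun ks m => PySem.Set.add ks (pvKeyB cols m)) [] := by
  rw [PySem.Dict.keys_foldl_modify_key, ← PySem.Set.update_map_eq_foldl_add]
  rfl

-- ===== VERDICT (by name: the statement is the Claim_ definition above) =====
theorem group_models_spec : Claim_equal_group_models := by
  intro models cols _ _
  show group_models models cols = group_models_alt models cols
  unfold group_models group_models_alt
  dsimp only
  rw [pvBuild_eq, pvBuild_keys]
  apply PySem.List.foldl_congr_mem
  intro out k _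
  rw [pvBuild_getD]
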